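-- pv_equiv track=rewrite | github.com/namhkoh/gelab-env | scripts/generate_eval_data.py | find_all_paths_bfs
-- ===== SOURCE A (Python) =====
-- from typing import Dict, List, Tuple, Optional
-- from collections import defaultdict
--
-- def find_all_paths_bfs(graph: Dict, max_depth: int = 7) -> Dict[int, List[Tuple[str, str, List[str]]]]:
--     """Find all paths grouped by length using BFS."""
--
--     paths_by_length = defaultdict(list)
--
--     # For each starting node
--     for start in graph.keys():
--         # BFS to find all reachable nodes
--         visited = {start: [start]}
--         queue = [(start, [start])]
--
--         while queue:
--             current, path = queue.pop(0)
--
--             if len(path) - 1 > max_depth: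
--                 continue
--
--             # Record this path if it's more than just the start
--             if len(path) > 1:
--                 path_length = len(path) - 1
--                 paths_by_length[path_length].append((start, current, path))
--
--             # Explore neighbors
--             for target, _, _ in graph.get(current, []):
--                 if target and target not in visited:
--                     new_path = path + [target]
--                     visited[target] = new_path
--                     queue.append((target, new_path))
--
--         # Also add paths via home button (for non-root pages to page_0)
--         if start != 'page_0' and 'page_0' not in visited:
--             paths_by_length[1].append((start, 'page_0', [start, 'page_0']))
--
--     return dict(paths_by_length)
-- ===== SOURCE B (Python) =====
-- def find_all_paths_bfs(graph, max_depth=7):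
--     """Find all paths grouped by length: parent-pointer BFS per start node,
--     then rebuild each path back-to-front from the parent chain."""
--     paths_by_length = {}
--     for start in graph:
--         # BFS storing only parent pointers and the discovery order (node, depth)
--         parent = {start: None}
--         order = []
--         queue = [(start, 0)]
--         i = 0
--         while i < len(queue):
--             node, d = queue[i]
--             i += 1
--             if d > max_depth:
--                 continue
--             for target, _, _ in graph.get(node, []):
--                 if target and target not in parent:
--                     parent[target] = node
--                     order.append((target, d + 1))
--                     queue.append((target, d + 1))
--         # second stage: reconstruct each recorded node's path from parent pointers
--         for node, d in order:
--             if d <= max_depth: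
--                 path = []
--                 cur = node
--                 while cur is not None:
--                     path.append(cur)
--                     cur = parent[cur]
--                 path.reverse()
--                 paths_by_length.setdefault(d, []).append((start, node, path))
--         if start != 'page_0' and 'page_0' not in parent:
--             paths_by_length.setdefault(1, []).append((start, 'page_0', [start, 'page_0']))
--     return paths_by_length
-- ===== Notes on version B (the rewrite author's own statement) =====
-- stated objective: alternative
-- what changed: A's BFS carries the full path inside every queue entry and emits each path at pop time; B's BFS stores only a parent pointer per node plus a (node, depth) discovery list, and a separate second stage rebuilds each path back-to-front by walking the parent chain before grouping by depth.
import Mathlib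
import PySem

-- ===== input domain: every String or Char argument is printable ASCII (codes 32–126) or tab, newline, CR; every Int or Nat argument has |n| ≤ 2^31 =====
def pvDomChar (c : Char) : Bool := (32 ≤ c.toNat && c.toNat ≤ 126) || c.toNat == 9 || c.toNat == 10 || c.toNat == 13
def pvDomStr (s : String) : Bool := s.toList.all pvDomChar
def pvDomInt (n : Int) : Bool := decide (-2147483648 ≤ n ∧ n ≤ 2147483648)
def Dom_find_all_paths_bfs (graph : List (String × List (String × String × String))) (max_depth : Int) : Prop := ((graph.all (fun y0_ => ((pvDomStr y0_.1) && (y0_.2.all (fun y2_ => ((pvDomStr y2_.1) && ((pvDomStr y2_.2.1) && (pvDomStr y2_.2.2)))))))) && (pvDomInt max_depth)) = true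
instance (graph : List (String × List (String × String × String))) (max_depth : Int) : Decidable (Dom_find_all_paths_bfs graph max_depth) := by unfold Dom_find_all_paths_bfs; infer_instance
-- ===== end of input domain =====

-- B replaces A's path-carrying BFS by a parent-pointer BFS plus a second stage that rebuilds
-- each path back-to-front from the parent chain; objective: alternative (no speed claim).

-- ===== PORT A =====
-- paths_by_length[k].append(e)  (defaultdict(list); also B's setdefault(k, []).append(e))
def pvAdd (acc : PySem.Dict Int (List (String × String × List String))) (k : Int)
    (e : String × String × List String) : PySem.Dict Int (List (String × String × List String)) :=
  acc.modify k [] (· ++ [e])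

-- A's 'while queue:' loop for one start node; fuel bounds the number of pops (each pop
-- consumes one unit; 2 + total number of targets in the graph always suffices, proved below).
def find_all_paths_bfs_go (g : PySem.Dict String (List (String × String × String))) (max_depth : Int)
    (start : String) :
    Nat → PySem.Dict String (List String) → List (String × List String) →
    PySem.Dict Int (List (String × String × List String)) →
    PySem.Dict String (List String) × PySem.Dict Int (List (String × String × List String))
  | 0, vis, _, acc => (vis, acc)
  | _ + 1, vis, [], acc => (vis, acc)
  | fuel + 1, vis, (current, path) :: rest, acc =>
    if ((path.length : Int) - 1) > max_depth then
      find_all_paths_bfs_go g max_depth start fuel vis rest acc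
    else
      let acc' := if 1 < path.length then pvAdd acc ((path.length : Int) - 1) (start, current, path) else acc
      let st := (g.getD current []).foldl
        (fun (st : PySem.Dict String (List String) × List (String × List String)) tgt =>
          if tgt.1 ≠ "" ∧ st.1.contains tgt.1 = false then
            (st.1.insert tgt.1 (path ++ [tgt.1]), st.2 ++ [(tgt.1, path ++ [tgt.1])])
          else st) (vis, rest)
      find_all_paths_bfs_go g max_depth start fuel st.1 st.2 acc'

def find_all_paths_bfs (graph : List (String × List (String × String × String))) (max_depth : Int) :
    List (Int × List (String × String × List String)) :=
  let g := PySem.Dict.mk graph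
  let fuel := 2 + (graph.map (fun kv => kv.2.length)).sum
  (g.keys.foldl (fun acc start =>
      let r := find_all_paths_bfs_go g max_depth start fuel
        (PySem.Dict.empty.insert start [start]) [(start, [start])] acc
      if start ≠ "page_0" ∧ r.1.contains "page_0" = false then
        pvAdd r.2 1 (start, "page_0", [start, "page_0"])
      else r.2) PySem.Dict.empty).items

-- ===== PORT B =====
-- Source B's reconstruction loop 'while cur is not None: path.append(cur); cur = parent[cur]'.
-- The fuel (number of parent entries) always suffices: the chain visits distinct keys; and
-- parent[cur] is present whenever queried, so getD is exact here (proved via the invariant).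
def pvChain (pa : PySem.Dict String (Option String)) : Nat → Option String → List String
  | 0, _ => []
  | _ + 1, none => []
  | fuel + 1, some cur => cur :: pvChain pa fuel (pa.getD cur none)

-- body of Source B's inner 'for target, _, _ in graph.get(node, [])' loop (state: parent, order, queue)
def pvStepB (node : String) (d : Int)
    (st : PySem.Dict String (Option String) × List (String × Int) × List (String × Int))
    (tgt : String × String × String) :
    PySem.Dict String (Option String) × List (String × Int) × List (String × Int) :=
  if tgt.1 ≠ "" ∧ st.1.contains tgt.1 = false then
    (st.1.insert tgt.1 (some node), st.2.1 ++ [(tgt.1, d + 1)], st.2.2 ++ [(tgt.1, d + 1)])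
  else st

-- Source B's BFS scan 'while i < len(queue)': recursion on the unscanned suffix of the queue,
-- appending fresh targets to parent/order/queue; fuel bounds the number of scanned entries.
def find_all_paths_bfs_alt_go (g : PySem.Dict String (List (String × String × String)))
    (max_depth : Int) :
    Nat → PySem.Dict String (Option String) → List (String × Int) → List (String × Int) →
    PySem.Dict String (Option String) × List (String × Int)
  | 0, pa, od, _ => (pa, od)
  | _ + 1, pa, od, [] => (pa, od)
  | fuel + 1, pa, od, (node, d) :: rest =>
    if d > max_depth then find_all_paths_bfs_alt_go g max_depth fuel pa od rest
    else
      let st := (g.getD node []).foldl (pvStepB node d) (pa, od, rest)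
      find_all_paths_bfs_alt_go g max_depth fuel st.1 st.2.1 st.2.2

-- body of Source B's second stage 'for node, d in order: if d <= max_depth: …reconstruct…append'
def pvEmit (pa : PySem.Dict String (Option String)) (start : String) (max_depth : Int)
    (a : PySem.Dict Int (List (String × String × List String))) (e : String × Int) :
    PySem.Dict Int (List (String × String × List String)) :=
  if e.2 ≤ max_depth then
    pvAdd a e.2 (start, e.1, (pvChain pa pa.items.length (some e.1)).reverse)
  else a

def find_all_paths_bfs_alt (graph : List (String × List (String × String × String))) (max_depth : Int) :
    List (Int × List (String × String × List String)) :=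
  let g := PySem.Dict.mk graph
  let fuel := 2 + (graph.map (fun kv => kv.2.length)).sum
  (g.keys.foldl (fun acc start =>
      let r := find_all_paths_bfs_alt_go g max_depth fuel
        (PySem.Dict.empty.insert start none) [] [(start, 0)]
      let acc2 := r.2.foldl (pvEmit r.1 start max_depth) acc
      if start ≠ "page_0" ∧ r.1.contains "page_0" = false then
        pvAdd acc2 1 (start, "page_0", [start, "page_0"])
      else acc2) PySem.Dict.empty).items

-- ===== PRECONDITION & SPEC =====
def Spec_find_all_paths_bfs (graph : List (String × List (String × String × String))) (max_depth : Int) (out : List (Int × List (String × String × List String))) : Prop := out = find_all_paths_bfs_alt graph max_depth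
instance (graph : List (String × List (String × String × String))) (max_depth : Int) (out : List (Int × List (String × String × List String))) : Decidable (Spec_find_all_paths_bfs graph max_depth out) := by unfold Spec_find_all_paths_bfs; infer_instance

-- ===== CLAIM (what is proved, stated in full; the proofs are below) =====
def Claim_equal_find_all_paths_bfs : Prop := ∀ (graph : List (String × List (String × String × String))) (max_depth : Int), Dom_find_all_paths_bfs graph max_depth → Spec_find_all_paths_bfs graph max_depth (find_all_paths_bfs graph max_depth)

-- ===== LEMMAS AND PROOFS =====

-- the neighbour-expansion step of A's inner 'for target,_,_ in graph.get(current,[])' loop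
def pvStepA (p : List String) :
    PySem.Dict String (List String) × List (String × List String) → String × String × String →
    PySem.Dict String (List String) × List (String × List String) := fun st tgt =>
  if tgt.1 ≠ "" ∧ st.1.contains tgt.1 = false then
    (st.1.insert tgt.1 (p ++ [tgt.1]), st.2 ++ [(tgt.1, p ++ [tgt.1])])
  else st

-- the parent chain of a node, read off from the reversed path: consecutive parent links ending at none
def pvChainR (pa : PySem.Dict String (Option String)) : List String → Prop
  | [] => True
  | n :: r => pa.get? n = some r.head? ∧ pvChainR pa r

-- coupling invariant between A's visited-path dict and B's parent dict
def pvInv (vis : PySem.Dict String (List String)) (pa : PySem.Dict String (Option String)) : Prop :=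
  (∀ t, vis.contains t = pa.contains t) ∧
  (∀ n p, vis.get? n = some p →
    pvChainR pa p.reverse ∧ p.reverse.head? = some n ∧
    (∀ x ∈ p, pa.contains x = true) ∧ p.Nodup ∧ p ≠ [])

lemma pv_chain_eval (pa : PySem.Dict String (Option String)) :
    ∀ (r : List String) (f : Nat), pvChainR pa r → r.length ≤ f → pvChain pa f r.head? = r := by
  intro r
  induction r with
  | nil => intro f _ _; cases f <;> rfl
  | cons x r' ih =>
    intro f hc hf
    obtain ⟨f', rfl⟩ : ∃ f', f = f' + 1 := ⟨f - 1, by simp at hf; omega⟩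
    obtain ⟨h1, h2⟩ := hc
    have hgd : pa.getD x none = r'.head? := by
      rw [PySem.Dict.getD_eq_get?_getD, h1]; rfl
    simp only [List.head?_cons, pvChain, hgd]
    rw [ih f' h2 (by simp at hf ⊢; omega)]

lemma pv_chainR_insert (pa : PySem.Dict String (Option String)) (k : String) (v : Option String)
    (hk : pa.contains k = false) :
    ∀ r : List String, pvChainR pa r → (∀ x ∈ r, pa.contains x = true) → pvChainR (pa.insert k v) r := by
  intro r
  induction r with
  | nil => intro _ _; trivial
  | cons x r' ih =>
    intro hc hm
    obtain ⟨h1, h2⟩ := hc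
    refine ⟨?_, ih h2 (fun y hy => hm y (List.mem_cons_of_mem _ hy))⟩
    have hne : x ≠ k := by
      intro h
      have hx := hm x (by simp)
      simp [h, hk] at hx
    rw [PySem.Dict.get?_insert_of_ne _ _ hne]; exact h1

-- one fresh discovery preserves the coupling invariant
lemma pv_inv_step (vis : PySem.Dict String (List String)) (pa : PySem.Dict String (Option String))
    (n : String) (p : List String) (t : String)
    (hInv : pvInv vis pa) (hvp : vis.get? n = some p) (hfresh : pa.contains t = false) :
    pvInv (vis.insert t (p ++ [t])) (pa.insert t (some n)) := by
  obtain ⟨hagree, hchain⟩ := hInv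
  obtain ⟨hcr, hhd, hmem, hnd, hne⟩ := hchain n p hvp
  constructor
  · intro x
    rw [PySem.Dict.contains_insert, PySem.Dict.contains_insert, hagree]
  · intro m q hget
    rw [PySem.Dict.get?_insert] at hget
    by_cases hmt : m = t
    · rw [if_pos hmt] at hget
      injection hget with hq
      subst hq; subst hmt
      have htnp : m ∉ p := fun h => by rw [hmem m h] at hfresh; cases hfresh
      refine ⟨?_, ?_, ?_, ?_, by simp⟩
      · rw [List.reverse_append]
        simp only [List.reverse_cons, List.reverse_nil, List.nil_append, List.singleton_append]
        refine ⟨?_, pv_chainR_insert pa m (some n) hfresh p.reverse hcr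
          (fun x hx => hmem x (List.mem_reverse.mp hx))⟩
        rw [PySem.Dict.get?_insert_self, hhd]
      · simp
      · intro x hx
        rw [PySem.Dict.contains_insert]
        rcases List.mem_append.mp hx with hx | hx
        · rw [hmem x hx]; simp
        · simp at hx; simp [hx]
      · simpa [List.nodup_append] using ⟨hnd, fun a ha h => htnp (h ▸ ha)⟩
    · rw [if_neg hmt] at hget
      obtain ⟨hcr', hhd', hmem', hnd', hne'⟩ := hchain m q hget
      refine ⟨pv_chainR_insert pa t (some n) hfresh q.reverse hcr'
        (fun x hx => hmem' x (List.mem_reverse.mp hx)), hhd', ?_, hnd', hne'⟩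
      intro x hx
      rw [PySem.Dict.contains_insert, hmem' x hx]; simp

-- coupled run of A's and B's neighbour loops over one adjacency list
lemma pv_inner_ab (tgts : List String) (start : String) (p : List String) (n : String) (d : Int) :
    ∀ (adj : List (String × String × String)) (vis : PySem.Dict String (List String))
      (pa : PySem.Dict String (Option String)) (qA : List (String × List String))
      (od qB : List (String × Int)),
      (∀ t ∈ adj, t.1 ∈ tgts) →
      vis.get? n = some p →
      pvInv vis pa →
      pa.keys.Nodup → (∀ k ∈ pa.keys, k ∈ start :: tgts) →
      ∃ E : List String,
        adj.foldl (pvStepA p) (vis, qA) =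
          ((adj.foldl (pvStepA p) (vis, qA)).1, qA ++ E.map (fun t => (t, p ++ [t]))) ∧
        adj.foldl (pvStepB n d) (pa, od, qB) =
          ((adj.foldl (pvStepB n d) (pa, od, qB)).1,
            od ++ E.map (fun t => (t, d + 1)), qB ++ E.map (fun t => (t, d + 1))) ∧
        pvInv (adj.foldl (pvStepA p) (vis, qA)).1 (adj.foldl (pvStepB n d) (pa, od, qB)).1 ∧
        (∀ k v, vis.get? k = some v → (adj.foldl (pvStepA p) (vis, qA)).1.get? k = some v) ∧
        (∀ t ∈ E, (adj.foldl (pvStepA p) (vis, qA)).1.get? t = some (p ++ [t])) ∧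
        (adj.foldl (pvStepB n d) (pa, od, qB)).1.keys = pa.keys ++ E ∧
        (adj.foldl (pvStepB n d) (pa, od, qB)).1.keys.Nodup ∧
        (∀ k ∈ (adj.foldl (pvStepB n d) (pa, od, qB)).1.keys, k ∈ start :: tgts) := by
  intro adj
  induction adj with
  | nil =>
    intro vis pa qA od qB _ _ hInv hknd hkm
    exact ⟨[], by simp, by simp, hInv, fun _ _ h => h, by simp, by simp, hknd, hkm⟩
  | cons a rest ih =>
    intro vis pa qA od qB htgt hvp hInv hknd hkm
    by_cases hc : a.1 ≠ "" ∧ pa.contains a.1 = false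
    · have hcA : a.1 ≠ "" ∧ vis.contains a.1 = false := ⟨hc.1, by rw [hInv.1]; exact hc.2⟩
      have hstepA : pvStepA p (vis, qA) a =
          (vis.insert a.1 (p ++ [a.1]), qA ++ [(a.1, p ++ [a.1])]) := by
        simp only [pvStepA]; rw [if_pos hcA]
      have hstepB : pvStepB n d (pa, od, qB) a =
          (pa.insert a.1 (some n), od ++ [(a.1, d + 1)], qB ++ [(a.1, d + 1)]) := by
        simp only [pvStepB]; rw [if_pos hc]
      have hInv' := pv_inv_step vis pa n p a.1 hInv hvp hc.2
      have hna : n ≠ a.1 := by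
        intro h
        obtain ⟨_, hhd, hmem, _, _⟩ := hInv.2 n p hvp
        have hn : n ∈ p := List.mem_reverse.mp (List.mem_of_mem_head? (by rw [hhd]; rfl))
        have hc2 := hc.2
        rw [← h] at hc2
        simp [hmem n hn] at hc2
      have hvp' : (vis.insert a.1 (p ++ [a.1])).get? n = some p := by
        rw [PySem.Dict.get?_insert_of_ne _ _ hna]; exact hvp
      have hkeys' : (pa.insert a.1 (some n)).keys = pa.keys ++ [a.1] :=
        PySem.Dict.keys_insert_of_not_contains _ _ hc.2
      have hnotmem : a.1 ∉ pa.keys := by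
        intro h
        have hmemk := (PySem.Dict.contains_iff_mem_keys pa a.1).mpr h
        simp [hc.2] at hmemk
      have hknd' : (pa.insert a.1 (some n)).keys.Nodup := by
        rw [hkeys']
        simpa [List.nodup_append] using ⟨hknd, fun b hb h => hnotmem (h ▸ hb)⟩
      have hkm' : ∀ k ∈ (pa.insert a.1 (some n)).keys, k ∈ start :: tgts := by
        intro k hk
        rw [hkeys'] at hk
        rcases List.mem_append.mp hk with hk | hk
        · exact hkm k hk
        · simp at hk
          exact hk ▸ List.mem_cons_of_mem _ (htgt a (by simp))
      obtain ⟨E, c1, c2, c3, c4, c5, c6, c7, c8⟩ :=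
        ih (vis.insert a.1 (p ++ [a.1])) (pa.insert a.1 (some n))
          (qA ++ [(a.1, p ++ [a.1])]) (od ++ [(a.1, d + 1)]) (qB ++ [(a.1, d + 1)])
          (fun t ht => htgt t (List.mem_cons_of_mem _ ht)) hvp' hInv' hknd' hkm'
      refine ⟨a.1 :: E, ?_, ?_, ?_, ?_, ?_, ?_, ?_, ?_⟩
      · simp only [List.foldl_cons, hstepA]
        rw [c1]; simp
      · simp only [List.foldl_cons, hstepB]
        rw [c2]; simp
      · simpa only [List.foldl_cons, hstepA, hstepB] using c3
      · intro k v hkv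
        simp only [List.foldl_cons, hstepA]
        apply c4
        have hka : k ≠ a.1 := by
          intro h
          have : vis.contains k = true := by
            rw [PySem.Dict.contains_eq_isSome_get?, hkv]; rfl
          rw [h, hcA.2] at this; cases this
        rw [PySem.Dict.get?_insert_of_ne _ _ hka]; exact hkv
      · intro t ht
        simp only [List.foldl_cons, hstepA]
        rcases List.mem_cons.mp ht with rfl | ht
        · exact c4 _ _ (PySem.Dict.get?_insert_self _ _ _)
        · exact c5 t ht
      · simp only [List.foldl_cons, hstepB]
        rw [c6, hkeys']; simp
      · simpa only [List.foldl_cons, hstepB] using c7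
      · simpa only [List.foldl_cons, hstepB] using c8
    · have hcA : ¬ (a.1 ≠ "" ∧ vis.contains a.1 = false) := by rw [hInv.1]; exact hc
      have hstepA : pvStepA p (vis, qA) a = (vis, qA) := by simp only [pvStepA]; rw [if_neg hcA]
      have hstepB : pvStepB n d (pa, od, qB) a = (pa, od, qB) := by
        simp only [pvStepB]; rw [if_neg hc]
      obtain ⟨E, c1, c2, c3, c4, c5, c6, c7, c8⟩ :=
        ih vis pa qA od qB (fun t ht => htgt t (List.mem_cons_of_mem _ ht)) hvp hInv hknd hkm
      exact ⟨E, by simpa only [List.foldl_cons, hstepA] using c1,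
        by simpa only [List.foldl_cons, hstepB] using c2,
        by simpa only [List.foldl_cons, hstepA, hstepB] using c3,
        by simpa only [List.foldl_cons, hstepA] using c4,
        by simpa only [List.foldl_cons, hstepA] using c5,
        by simpa only [List.foldl_cons, hstepB] using c6,
        by simpa only [List.foldl_cons, hstepB] using c7,
        by simpa only [List.foldl_cons, hstepB] using c8⟩

lemma pv_go_nil (g : PySem.Dict String (List (String × String × String))) (maxd : Int)
    (start : String) (fuel : Nat) (vis : PySem.Dict String (List String))
    (acc : PySem.Dict Int (List (String × String × List String))) :
    find_all_paths_bfs_go g maxd start fuel vis [] acc = (vis, acc) := by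
  cases fuel <;> rfl

lemma pv_go_cons (g : PySem.Dict String (List (String × String × String))) (maxd : Int)
    (start : String) (fuel : Nat) (vis : PySem.Dict String (List String))
    (cur : String) (p : List String) (rest : List (String × List String))
    (acc : PySem.Dict Int (List (String × String × List String))) :
    find_all_paths_bfs_go g maxd start (fuel + 1) vis ((cur, p) :: rest) acc =
      if ((p.length : Int) - 1) > maxd then
        find_all_paths_bfs_go g maxd start fuel vis rest acc
      else
        let acc' := if 1 < p.length then pvAdd acc ((p.length : Int) - 1) (start, cur, p) else acc
        let st := (g.getD cur []).foldl (pvStepA p) (vis, rest)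
        find_all_paths_bfs_go g maxd start fuel st.1 st.2 acc' := rfl

lemma pv_goB_nil (g : PySem.Dict String (List (String × String × String))) (maxd : Int)
    (fuel : Nat) (pa : PySem.Dict String (Option String)) (od : List (String × Int)) :
    find_all_paths_bfs_alt_go g maxd fuel pa od [] = (pa, od) := by
  cases fuel <;> rfl

-- reconstructed path of a visited node, w.r.t. the final parent dict
lemma pv_chain_of_inv (vis : PySem.Dict String (List String))
    (pa : PySem.Dict String (Option String)) (n : String) (p : List String)
    (hInv : pvInv vis pa) (hvp : vis.get? n = some p) :
    pvChain pa pa.items.length (some n) = p.reverse := by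
  obtain ⟨hcr, hhd, hmem, hnd, _⟩ := hInv.2 n p hvp
  have hsub : p ⊆ pa.keys := by
    intro x hx
    exact (PySem.Dict.contains_iff_mem_keys _ _).mp (hmem x hx)
  have hlen : p.length ≤ pa.items.length := by
    have h1 : p.length ≤ pa.keys.length := (List.subperm_of_subset hnd hsub).length_le
    have h2 : pa.keys.length = pa.items.length := by simp [PySem.Dict.keys]
    omega
  have := pv_chain_eval pa p.reverse pa.items.length hcr (by simpa using hlen)
  rw [hhd] at this
  exact this

-- the coupling: A's queue loop equals B's scan loop plus B's deferred emission stage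
lemma pv_couple (g : PySem.Dict String (List (String × String × String))) (maxd : Int)
    (start : String) (tgts : List String)
    (htgt : ∀ cur (t : String × String × String), t ∈ g.getD cur [] → t.1 ∈ tgts) :
    ∀ (fuel : Nat) (qA : List (String × List String)) (vis : PySem.Dict String (List String))
      (pa : PySem.Dict String (Option String)) (od : List (String × Int))
      (acc : PySem.Dict Int (List (String × String × List String))),
      (∀ e ∈ qA, vis.get? e.1 = some e.2 ∧ 2 ≤ e.2.length) →
      pvInv vis pa →
      pa.keys.Nodup → (∀ k ∈ pa.keys, k ∈ start :: tgts) →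
      qA.length + ((start :: tgts).length - pa.keys.length) ≤ fuel →
      (∃ Δ : List (String × Int),
        (find_all_paths_bfs_alt_go g maxd fuel pa od
          (qA.map (fun e => (e.1, (e.2.length : Int) - 1)))).2 = od ++ Δ ∧
        (find_all_paths_bfs_go g maxd start fuel vis qA acc).2 =
          ((qA.map (fun e => (e.1, (e.2.length : Int) - 1))) ++ Δ).foldl
            (pvEmit (find_all_paths_bfs_alt_go g maxd fuel pa od
              (qA.map (fun e => (e.1, (e.2.length : Int) - 1)))).1 start maxd) acc) ∧
      pvInv (find_all_paths_bfs_go g maxd start fuel vis qA acc).1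
        (find_all_paths_bfs_alt_go g maxd fuel pa od
          (qA.map (fun e => (e.1, (e.2.length : Int) - 1)))).1 ∧
      (∀ k v, vis.get? k = some v →
        (find_all_paths_bfs_go g maxd start fuel vis qA acc).1.get? k = some v) := by
  intro fuel
  induction fuel using Nat.strong_induction_on with
  | _ fuel ih =>
    intro qA vis pa od acc hq hInv hknd hkm hfuel
    rcases hqA : qA with _ | ⟨⟨n, p⟩, rest⟩
    · subst hqA
      simp only [List.map_nil, pv_go_nil, pv_goB_nil]
      exact ⟨⟨[], by simp, by simp⟩, hInv, fun _ _ h => h⟩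
    · subst hqA
      obtain ⟨f, rfl⟩ : ∃ f, fuel = f + 1 := ⟨fuel - 1, by simp at hfuel; omega⟩
      obtain ⟨hvp, hplen⟩ := hq (n, p) (by simp)
      replace hvp : vis.get? n = some p := hvp
      replace hplen : 2 ≤ p.length := hplen
      set d : Int := (p.length : Int) - 1 with hd
      have hmap : (((n, p) :: rest).map (fun e => (e.1, (e.2.length : Int) - 1)))
          = (n, d) :: rest.map (fun e => (e.1, (e.2.length : Int) - 1)) := by simp [hd]
      rw [hmap]
      by_cases hdm : d > maxd
      · -- both sides skip this entry
        have hA : find_all_paths_bfs_go g maxd start (f + 1) vis ((n, p) :: rest) acc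
            = find_all_paths_bfs_go g maxd start f vis rest acc := by
          rw [pv_go_cons, if_pos (by omega)]
        have hB : find_all_paths_bfs_alt_go g maxd (f + 1) pa od
              ((n, d) :: rest.map (fun e => (e.1, (e.2.length : Int) - 1)))
            = find_all_paths_bfs_alt_go g maxd f pa od
              (rest.map (fun e => (e.1, (e.2.length : Int) - 1))) := by
          simp only [find_all_paths_bfs_alt_go]
          rw [if_pos hdm]
        obtain ⟨⟨Δ, e1, e2⟩, i1, i2⟩ :=
          ih f (by omega) rest vis pa od acc
            (fun e he => hq e (List.mem_cons_of_mem _ he)) hInv hknd hkm (by simp only [List.length_cons] at hfuel ⊢; omega)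
        rw [hA, hB]
        refine ⟨⟨Δ, e1, ?_⟩, i1, i2⟩
        rw [e2, List.cons_append, List.foldl_cons]
        have : pvEmit (find_all_paths_bfs_alt_go g maxd f pa od
            (rest.map (fun e => (e.1, (e.2.length : Int) - 1)))).1 start maxd acc (n, d) = acc := by
          simp only [pvEmit]
          rw [if_neg (by omega)]
        rw [this]
      · -- both sides expand this entry
        obtain ⟨E, c1, c2, c3, c4, c5, c6, c7, c8⟩ :=
          pv_inner_ab tgts start p n d (g.getD n []) vis pa rest od
            (rest.map (fun e => (e.1, (e.2.length : Int) - 1)))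
            (fun t ht => htgt n t ht) hvp hInv hknd hkm
        set stA := (g.getD n []).foldl (pvStepA p) (vis, rest) with hstA
        set stB := (g.getD n []).foldl (pvStepB n d) (pa, od,
          rest.map (fun e => (e.1, (e.2.length : Int) - 1))) with hstB
        have hA : find_all_paths_bfs_go g maxd start (f + 1) vis ((n, p) :: rest) acc
            = find_all_paths_bfs_go g maxd start f stA.1 stA.2
                (pvAdd acc d (start, n, p)) := by
          rw [pv_go_cons, if_neg (by omega)]
          simp only [← hstA]
          rw [if_pos (by omega)]
        have hB : find_all_paths_bfs_alt_go g maxd (f + 1) pa od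
              ((n, d) :: rest.map (fun e => (e.1, (e.2.length : Int) - 1)))
            = find_all_paths_bfs_alt_go g maxd f stB.1 stB.2.1 stB.2.2 := by
          simp only [find_all_paths_bfs_alt_go]
          rw [if_neg hdm]
        -- the new A-queue and its depth image
        have hq' : ∀ e ∈ stA.2, stA.1.get? e.1 = some e.2 ∧ 2 ≤ e.2.length := by
          rw [c1]
          intro e he
          rcases List.mem_append.mp he with he | he
          · obtain ⟨h1, h2⟩ := hq e (List.mem_cons_of_mem _ he)
            exact ⟨c4 e.1 e.2 h1, h2⟩
          · obtain ⟨t, ht, rfl⟩ := List.mem_map.mp he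
            refine ⟨c5 t ht, ?_⟩
            show 2 ≤ (p ++ [t]).length
            simp only [List.length_append, List.length_cons, List.length_nil]
            omega
        have hqmap : stA.2.map (fun e => (e.1, (e.2.length : Int) - 1)) = stB.2.2 := by
          rw [c1, c2]
          simp only [List.map_append, List.map_map]
          congr 1
          apply List.map_congr_left
          intro t _
          simp only [Function.comp]
          congr 1
          simp only [List.length_append, List.length_cons, List.length_nil]
          push_cast
          omega
        have hkeylen : stB.1.keys.length = pa.keys.length + E.length := by rw [c6]; simp
        have hkeyle : stB.1.keys.length ≤ (start :: tgts).length :=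
          (List.subperm_of_subset c7 (fun k hk => c8 k hk)).length_le
        have hfuel' : stA.2.length + ((start :: tgts).length - stB.1.keys.length) ≤ f := by
          have h1 : stA.2.length = rest.length + E.length := by rw [c1]; simp
          have h2 : pa.keys.length ≤ (start :: tgts).length :=
            (List.subperm_of_subset hknd (fun k hk => hkm k hk)).length_le
          simp only [List.length_cons] at hfuel hkeyle h2 ⊢
          omega
        obtain ⟨⟨Δ, e1, e2⟩, i1, i2⟩ :=
          ih f (by omega) stA.2 stA.1 stB.1 stB.2.1 (pvAdd acc d (start, n, p)) hq' c3 c7 c8 hfuel'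
        rw [hqmap] at e1 e2 i1
        rw [hA, hB]
        set paF := (find_all_paths_bfs_alt_go g maxd f stB.1 stB.2.1 stB.2.2).1 with hpaF
        have hodB : stB.2.1 = od ++ E.map (fun t => (t, d + 1)) := by rw [c2]
        refine ⟨⟨E.map (fun t => (t, d + 1)) ++ Δ, ?_, ?_⟩, i1, ?_⟩
        · rw [e1, hodB, List.append_assoc]
        · rw [e2]
          rw [List.cons_append, List.foldl_cons]
          have hemit : pvEmit paF start maxd acc (n, d) = pvAdd acc d (start, n, p) := by
            have hnF : (find_all_paths_bfs_go g maxd start f stA.1 stA.2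
                (pvAdd acc d (start, n, p))).1.get? n = some p :=
              i2 n p (c4 n p hvp)
            have hchain := pv_chain_of_inv _ paF n p i1 hnF
            simp only [pvEmit]
            rw [if_pos (by omega), hchain, List.reverse_reverse]
          rw [hemit]
          congr 1
          have h22 : stB.2.2 = rest.map (fun e => (e.1, (e.2.length : Int) - 1))
              ++ E.map (fun t => (t, d + 1)) := by rw [c2]
          rw [h22, List.append_assoc]
        · intro k v hkv
          exact i2 k v (c4 k v hkv)

-- all target strings of the graph, in order
def pvTgts (graph : List (String × List (String × String × String))) : List String :=
  graph.flatMap (fun kv => kv.2.map (fun t => t.1))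

lemma pv_getD_mk_sub :
    ∀ (l : List (String × List (String × String × String))) (cur : String),
      (PySem.Dict.mk l).getD cur [] = [] ∨ ∃ kv ∈ l, (PySem.Dict.mk l).getD cur [] = kv.2 := by
  intro l
  induction l with
  | nil => intro cur; left; rfl
  | cons kv rest ih =>
    intro cur
    obtain ⟨k, v⟩ := kv
    rw [PySem.Dict.getD_eq_get?_getD, PySem.Dict.get?_mk_cons]
    by_cases h : k == cur
    · right
      exact ⟨(k, v), by simp, by rw [if_pos h]; rfl⟩
    · rw [if_neg h, ← PySem.Dict.getD_eq_get?_getD]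
      rcases ih cur with h0 | ⟨kv', hkv', heq⟩
      · left; exact h0
      · right; exact ⟨kv', List.mem_cons_of_mem _ hkv', heq⟩

lemma pv_tgts_mem (graph : List (String × List (String × String × String))) :
    ∀ cur (t : String × String × String),
      t ∈ (PySem.Dict.mk graph).getD cur [] → t.1 ∈ pvTgts graph := by
  intro cur t ht
  rcases pv_getD_mk_sub graph cur with h0 | ⟨kv, hkv, heq⟩
  · rw [h0] at ht; cases ht
  · rw [heq] at ht
    exact List.mem_flatMap.mpr ⟨kv, hkv, List.mem_map.mpr ⟨t, ht, rfl⟩⟩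

lemma pv_tgts_len (graph : List (String × List (String × String × String))) :
    (pvTgts graph).length = (graph.map (fun kv => kv.2.length)).sum := by
  simp [pvTgts, List.length_flatMap]

-- the coupling invariant holds for the initial per-start state
lemma pv_inv_init (start : String) :
    pvInv (PySem.Dict.empty.insert start [start]) (PySem.Dict.empty.insert start none) := by
  constructor
  · intro t
    rw [PySem.Dict.contains_insert, PySem.Dict.contains_insert]
    simp [PySem.Dict.contains_empty]
  · intro m q hget
    rw [PySem.Dict.get?_insert] at hget
    by_cases hm : m = start
    · rw [if_pos hm] at hget
      injection hget with hq
      subst hq; subst hm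
      refine ⟨⟨?_, trivial⟩, by simp, ?_, by simp, by simp⟩
      · rw [PySem.Dict.get?_insert_self]; rfl
      · intro x hx
        simp at hx
        rw [hx, PySem.Dict.contains_insert]; simp
    · rw [if_neg hm, PySem.Dict.get?_empty] at hget
      cases hget

-- one whole start node: A's per-start step equals B's per-start step
lemma pv_start (graph : List (String × List (String × String × String))) (maxd : Int)
    (start : String) (acc : PySem.Dict Int (List (String × String × List String))) :
    (if start ≠ "page_0" ∧
        (find_all_paths_bfs_go (PySem.Dict.mk graph) maxd start
          (2 + (graph.map (fun kv => kv.2.length)).sum)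
          (PySem.Dict.empty.insert start [start]) [(start, [start])] acc).1.contains "page_0" = false
      then
        pvAdd (find_all_paths_bfs_go (PySem.Dict.mk graph) maxd start
          (2 + (graph.map (fun kv => kv.2.length)).sum)
          (PySem.Dict.empty.insert start [start]) [(start, [start])] acc).2
          1 (start, "page_0", [start, "page_0"])
      else
        (find_all_paths_bfs_go (PySem.Dict.mk graph) maxd start
          (2 + (graph.map (fun kv => kv.2.length)).sum)
          (PySem.Dict.empty.insert start [start]) [(start, [start])] acc).2)
    = (if start ≠ "page_0" ∧
        (find_all_paths_bfs_alt_go (PySem.Dict.mk graph) maxd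
          (2 + (graph.map (fun kv => kv.2.length)).sum)
          (PySem.Dict.empty.insert start none) [] [(start, 0)]).1.contains "page_0" = false
      then
        pvAdd ((find_all_paths_bfs_alt_go (PySem.Dict.mk graph) maxd
            (2 + (graph.map (fun kv => kv.2.length)).sum)
            (PySem.Dict.empty.insert start none) [] [(start, 0)]).2.foldl
          (pvEmit (find_all_paths_bfs_alt_go (PySem.Dict.mk graph) maxd
            (2 + (graph.map (fun kv => kv.2.length)).sum)
            (PySem.Dict.empty.insert start none) [] [(start, 0)]).1 start maxd) acc)
          1 (start, "page_0", [start, "page_0"])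
      else
        (find_all_paths_bfs_alt_go (PySem.Dict.mk graph) maxd
            (2 + (graph.map (fun kv => kv.2.length)).sum)
            (PySem.Dict.empty.insert start none) [] [(start, 0)]).2.foldl
          (pvEmit (find_all_paths_bfs_alt_go (PySem.Dict.mk graph) maxd
            (2 + (graph.map (fun kv => kv.2.length)).sum)
            (PySem.Dict.empty.insert start none) [] [(start, 0)]).1 start maxd) acc) := by
  set g := PySem.Dict.mk graph with hg
  set S := (graph.map (fun kv => kv.2.length)).sum with hS
  have hInv0 := pv_inv_init start
  have hvp0 : (PySem.Dict.empty.insert start [start]).get? start = some [start] :=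
    PySem.Dict.get?_insert_self _ _ _
  have hkeys0 : (PySem.Dict.empty.insert start (none : Option String)).keys = [start] := by
    rw [PySem.Dict.keys_insert_of_not_contains PySem.Dict.empty (none : Option String)
      (by simp [PySem.Dict.contains_empty])]
    simp [PySem.Dict.keys_empty]
  have hknd0 : (PySem.Dict.empty.insert start (none : Option String)).keys.Nodup := by
    rw [hkeys0]; simp
  have hkm0 : ∀ k ∈ (PySem.Dict.empty.insert start (none : Option String)).keys,
      k ∈ start :: pvTgts graph := by
    intro k hk; rw [hkeys0] at hk; simp at hk; simp [hk]
  by_cases hmd : (0 : Int) > maxd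
  · -- the start entry itself is already beyond max_depth: both loops stop at once
    have hA : find_all_paths_bfs_go g maxd start (2 + S)
        (PySem.Dict.empty.insert start [start]) [(start, [start])] acc
        = (PySem.Dict.empty.insert start [start], acc) := by
      rw [show 2 + S = (1 + S) + 1 by omega, pv_go_cons, if_pos (by simp; omega), pv_go_nil]
    have hB : find_all_paths_bfs_alt_go g maxd (2 + S)
        (PySem.Dict.empty.insert start none) [] [(start, 0)]
        = (PySem.Dict.empty.insert start none, []) := by
      rw [show 2 + S = (1 + S) + 1 by omega]
      simp only [find_all_paths_bfs_alt_go]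
      rw [if_pos (by omega), pv_goB_nil]
    rw [hA, hB]
    simp only [List.foldl_nil, hInv0.1 "page_0"]
  · -- expand the start entry, then run the coupled loops
    obtain ⟨E, c1, c2, c3, c4, c5, c6, c7, c8⟩ :=
      pv_inner_ab (pvTgts graph) start [start] start 0 (g.getD start [])
        (PySem.Dict.empty.insert start [start]) (PySem.Dict.empty.insert start none)
        [] [] [] (fun t ht => pv_tgts_mem graph start t ht) hvp0 hInv0 hknd0 hkm0
    set stA := (g.getD start []).foldl (pvStepA [start])
      (PySem.Dict.empty.insert start [start], []) with hstA
    set stB := (g.getD start []).foldl (pvStepB start 0)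
      (PySem.Dict.empty.insert start none, [], []) with hstB
    have hA : find_all_paths_bfs_go g maxd start (2 + S)
          (PySem.Dict.empty.insert start [start]) [(start, [start])] acc
        = find_all_paths_bfs_go g maxd start (1 + S) stA.1 stA.2 acc := by
      rw [show 2 + S = (1 + S) + 1 by omega, pv_go_cons, if_neg (by simp; omega)]
      simp only [List.length_cons, List.length_nil]
      rw [if_neg (by omega)]
    have hB : find_all_paths_bfs_alt_go g maxd (2 + S)
          (PySem.Dict.empty.insert start none) [] [(start, 0)]
        = find_all_paths_bfs_alt_go g maxd (1 + S) stB.1 stB.2.1 stB.2.2 := by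
      rw [show 2 + S = (1 + S) + 1 by omega]
      simp only [find_all_paths_bfs_alt_go]
      rw [if_neg (by omega)]
    have hq' : ∀ e ∈ stA.2, stA.1.get? e.1 = some e.2 ∧ 2 ≤ e.2.length := by
      rw [c1]
      intro e he
      simp only [List.nil_append] at he
      obtain ⟨t, ht, rfl⟩ := List.mem_map.mp he
      exact ⟨c5 t ht, by simp⟩
    have hqmap : stA.2.map (fun e => (e.1, (e.2.length : Int) - 1)) = stB.2.2 := by
      rw [c1, c2]
      simp only [List.nil_append, List.map_map]
      apply List.map_congr_left
      intro t _
      simp [Function.comp]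
    have hkeyF : stB.1.keys = [start] ++ E := by rw [c6, hkeys0]
    have hElen : E.length ≤ (pvTgts graph).length := by
      have h1 : stB.1.keys.length ≤ (start :: pvTgts graph).length :=
        (List.subperm_of_subset c7 (fun k hk => c8 k hk)).length_le
      rw [hkeyF] at h1
      simp at h1
      omega
    have hfuel' : stA.2.length + ((start :: pvTgts graph).length - stB.1.keys.length) ≤ 1 + S := by
      have h1 : stA.2.length = E.length := by rw [c1]; simp
      have h2 : stB.1.keys.length = 1 + E.length := by rw [hkeyF]; simp; omega
      have h3 : (pvTgts graph).length = S := by rw [pv_tgts_len graph, hS]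
      simp only [List.length_cons]
      omega
    obtain ⟨⟨Δ, e1, e2⟩, i1, i2⟩ :=
      pv_couple g maxd start (pvTgts graph) (pv_tgts_mem graph) (1 + S)
        stA.2 stA.1 stB.1 stB.2.1 acc hq' c3 c7 c8 hfuel'
    rw [hqmap] at e1 e2 i1
    rw [hA, hB]
    have hodB : stB.2.1 = stB.2.2 := by rw [c2]
    have hacc : (find_all_paths_bfs_go g maxd start (1 + S) stA.1 stA.2 acc).2
        = (find_all_paths_bfs_alt_go g maxd (1 + S) stB.1 stB.2.1 stB.2.2).2.foldl
            (pvEmit (find_all_paths_bfs_alt_go g maxd (1 + S) stB.1 stB.2.1 stB.2.2).1 start maxd)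
            acc := by
      rw [e2, e1, hodB]
    rw [hacc, i1.1 "page_0"]

-- ===== VERDICT (by name: the statement is the Claim_ definition above) =====
theorem find_all_paths_bfs_spec : Claim_equal_find_all_paths_bfs := by
  intro graph maxd _
  unfold Spec_find_all_paths_bfs find_all_paths_bfs find_all_paths_bfs_alt
  simp only []
  refine congrArg PySem.Dict.items ?_
  apply PySem.List.foldl_congr_mem
  intro acc start _
  exact pv_start graph maxd start acc
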